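-- pv_equiv track=rewrite | github.com/mys-lang/mys | mys/coverage/results.py | _line_ranges
-- ===== SOURCE A (Python) =====
-- def _line_ranges(statements, lines):
--     """Produce a list of ranges for `format_lines`."""
--     statements = sorted(statements)
--     lines = sorted(lines)
--
--     pairs = []
--     start = None
--     lidx = 0
--     for stmt in statements:
--         if lidx >= len(lines):
--             break
--         if stmt == lines[lidx]:
--             lidx += 1
--             if not start:
--                 start = stmt
--             end = stmt
--         elif start:
--             pairs.append((start, end))
--             start = None
--     if start:
--         pairs.append((start, end))
--     return pairs
-- ===== SOURCE B (Python) =====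
-- def _line_ranges(statements, lines):
--     """Produce a list of ranges for `format_lines`."""
--     lines = sorted(lines)
--     # phase 1: two-pointer merge marking which sorted statements hit a line
--     marked = []
--     lidx = 0
--     for stmt in sorted(statements):
--         if lidx >= len(lines):
--             break
--         matched = (stmt == lines[lidx])
--         if matched:
--             lidx += 1
--         marked.append((stmt, matched))
--     # phase 2: coalesce maximal runs of matched statements into (start, end) pairs
--     pairs = []
--     start = end = None
--     for stmt, matched in marked:
--         if matched:
--             if start is None:
--                 start = stmt
--             end = stmt
--         elif start is not None:
--             pairs.append((start, end))
--             start = None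
--     if start is not None:
--         pairs.append((start, end))
--     return pairs
-- ===== Notes on version B (the rewrite author's own statement) =====
-- stated objective: alternative
-- what changed: A interleaves the two-pointer merge with range building in one stateful loop; B splits it into a merge pass that marks which sorted statements matched a line and a second pass that coalesces maximal matched runs into (start, end) pairs, tracking the open range with an explicit None check.
-- intended difference: On inputs where a maximal run of statement/line coincidences (both lists sorted) starts at line 0, A's 'if not start' truthiness treats the range opened at 0 as no range and drops or truncates it (e.g. [0],[0] -> [] and [0,1,2],[0,1,2] -> [(1,2)]); B's None check returns the full range ([(0,0)] resp. [(0,2)]), the intended behaviour since 0 is an ordinary line number. — e.g. on _line_ranges([0, 1, 2], [0, 1, 2]): A returns [(1, 2)], B returns [(0, 2)]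
import Mathlib
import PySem

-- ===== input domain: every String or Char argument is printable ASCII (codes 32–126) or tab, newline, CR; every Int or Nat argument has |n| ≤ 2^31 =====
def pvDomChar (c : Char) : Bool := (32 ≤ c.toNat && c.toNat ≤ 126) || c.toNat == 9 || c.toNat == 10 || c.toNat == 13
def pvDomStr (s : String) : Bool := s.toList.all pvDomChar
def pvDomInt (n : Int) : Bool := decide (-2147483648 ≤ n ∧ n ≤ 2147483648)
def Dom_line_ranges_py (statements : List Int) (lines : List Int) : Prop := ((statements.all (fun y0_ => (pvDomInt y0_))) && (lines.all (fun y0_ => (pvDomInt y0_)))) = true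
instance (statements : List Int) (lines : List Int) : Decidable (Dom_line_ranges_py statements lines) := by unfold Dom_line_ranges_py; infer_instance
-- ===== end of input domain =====

-- B replaces A's single stateful loop by a mark-then-coalesce two-pass decomposition
-- (objective: alternative, same asymptotic cost); B's None check intentionally differs
-- from A's truthiness on the inputs described by D_ below (a range opening at line 0).

-- ===== PORT A =====

-- Python truthiness of `start` (None or int): falsy iff None or 0
def pyTruthy (o : Option Int) : Bool :=
  match o with
  | none => false
  | some v => v != 0

-- the for-loop of A; state: lidx, start, end, pairs; returning early models `break`
def lineRangesGoA (lines : List Int) : List Int → Nat → Option Int → Option Int →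
    List (Int × Int) → List (Int × Int) × Option Int × Option Int
  | [], _, start, end_, pairs => (pairs, start, end_)
  | stmt :: rest, lidx, start, end_, pairs =>
    if lines.length ≤ lidx then (pairs, start, end_)          -- break
    else if stmt = lines.getD lidx 0 then                     -- lines[lidx], lidx < len
      lineRangesGoA lines rest (lidx + 1)
        (if pyTruthy start then start else some stmt) (some stmt) pairs
    else if pyTruthy start then
      -- `end` is always bound when `start` is truthy, so getD 0 is never the default
      lineRangesGoA lines rest lidx none end_ (pairs ++ [(start.getD 0, end_.getD 0)])
    else
      lineRangesGoA lines rest lidx start end_ pairs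

def line_ranges_py (statements : List Int) (lines : List Int) : List (Int × Int) :=
  let statements := PySem.List.sorted statements (fun x => x) false
  let lines := PySem.List.sorted lines (fun x => x) false
  match lineRangesGoA lines statements 0 none none [] with
  | (pairs, start, end_) =>
    if pyTruthy start then pairs ++ [(start.getD 0, end_.getD 0)] else pairs

-- ===== PORT B =====

-- phase 1: two-pointer merge marking which sorted statements hit a line
def lineRangesMark (lines : List Int) : List Int → Nat → List (Int × Bool)
  | [], _ => []
  | stmt :: rest, lidx =>
    if lines.length ≤ lidx then []                            -- break
    else
      let matched := stmt == lines.getD lidx 0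
      (stmt, matched) :: lineRangesMark lines rest (if matched then lidx + 1 else lidx)

-- phase 2: coalesce maximal runs of matched statements; start = none means no open range
def lineRangesCoalesce : List (Int × Bool) → Option Int → Option Int → List (Int × Int) →
    List (Int × Int)
  | [], start, end_, pairs =>
    if start.isSome then pairs ++ [(start.getD 0, end_.getD 0)] else pairs
  | (stmt, matched) :: rest, start, end_, pairs =>
    if matched then
      lineRangesCoalesce rest (if start.isSome then start else some stmt) (some stmt) pairs
    else if start.isSome then
      lineRangesCoalesce rest none end_ (pairs ++ [(start.getD 0, end_.getD 0)])
    else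
      lineRangesCoalesce rest start end_ pairs

def line_ranges_py_alt (statements : List Int) (lines : List Int) : List (Int × Int) :=
  let lines := PySem.List.sorted lines (fun x => x) false
  lineRangesCoalesce
    (lineRangesMark lines (PySem.List.sorted statements (fun x => x) false) 0) none none []

-- ===== PRECONDITION & SPEC =====

-- D_ support: scanning the two sorted lists in step, is some statement equal to 0 the first
-- statement of a maximal run of statement/line coincidences (open_ = a run of nonzero
-- coincidences is in progress)?  This is the input shape on which A's truthiness misfires.
def zeroOpensRun : List Int → List Int → Bool → Bool
  | [], _, _ => false
  | _ :: _, [], _ => false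
  | stmt :: srest, line :: lrest, open_ =>
    if stmt = line then
      (decide (stmt = 0) && !open_) || zeroOpensRun srest lrest (open_ || decide (stmt ≠ 0))
    else zeroOpensRun srest (line :: lrest) false

-- On inputs where a maximal run of statement/line coincidences starts at line 0, A's
-- `if not start` truthiness treats the range it opens as no range and drops or truncates it
-- (e.g. [0],[0] → [] and [0,1,2],[0,1,2] → [(1,2)]); B's None check returns the full range
-- ([(0,0)] resp. [(0,2)]), the intended behaviour since 0 is an ordinary line number.
def D_line_ranges_py (statements : List Int) (lines : List Int) : Prop :=
  zeroOpensRun (statements.mergeSort (· ≤ ·)) (lines.mergeSort (· ≤ ·)) false = true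
instance (statements : List Int) (lines : List Int) : Decidable (D_line_ranges_py statements lines) := by unfold D_line_ranges_py; infer_instance

def Spec_line_ranges_py (statements : List Int) (lines : List Int) (out : List (Int × Int)) : Prop := ¬ D_line_ranges_py statements lines → out = line_ranges_py_alt statements lines
instance (statements : List Int) (lines : List Int) (out : List (Int × Int)) : Decidable (Spec_line_ranges_py statements lines out) := by unfold Spec_line_ranges_py; infer_instance

def pvDiffWitness_line_ranges_py : List Int × List Int := ([0, 1, 2], [0, 1, 2])
def pvDiffWitnessOut_line_ranges_py : (List (Int × Int)) × (List (Int × Int)) :=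
  ([(1, 2)], [(0, 2)])

-- ===== CLAIM (what is proved, stated in full; the proofs are below) =====
def Claim_unchanged_line_ranges_py : Prop := ∀ (statements : List Int) (lines : List Int), Dom_line_ranges_py statements lines → Spec_line_ranges_py statements lines (line_ranges_py statements lines)
def Claim_changed_line_ranges_py : Prop := Dom_line_ranges_py (pvDiffWitness_line_ranges_py.1) (pvDiffWitness_line_ranges_py.2) ∧ D_line_ranges_py (pvDiffWitness_line_ranges_py.1) (pvDiffWitness_line_ranges_py.2) ∧ line_ranges_py (pvDiffWitness_line_ranges_py.1) (pvDiffWitness_line_ranges_py.2) = pvDiffWitnessOut_line_ranges_py.1 ∧ line_ranges_py_alt (pvDiffWitness_line_ranges_py.1) (pvDiffWitness_line_ranges_py.2) = pvDiffWitnessOut_line_ranges_py.2 ∧ pvDiffWitnessOut_line_ranges_py.1 ≠ pvDiffWitnessOut_line_ranges_py.2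
def Claim_exact_line_ranges_py : Prop := ∀ (statements : List Int) (lines : List Int), Dom_line_ranges_py statements lines → D_line_ranges_py statements lines → line_ranges_py statements lines ≠ line_ranges_py_alt statements lines

-- ===== LEMMAS AND PROOFS =====

-- A's final flush, as a function of A's loop state
def lrFinal (t : List (Int × Int) × Option Int × Option Int) : List (Int × Int) :=
  if pyTruthy t.2.1 then t.1 ++ [(t.2.1.getD 0, t.2.2.getD 0)] else t.1

-- elementwise view of A's range building over the marked list; state = some (start, end)
-- (start may be 0 = falsy), none = no open range
def lrFlush (st : Option (Int × Int)) : List (Int × Int) :=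
  match st with
  | none => []
  | some (a, e) => if a ≠ 0 then [(a, e)] else []

def lrEmit (st : Option (Int × Int)) : List (Int × Bool) → List (Int × Int)
  | [] => lrFlush st
  | (s, true) :: r =>
      lrEmit (some ((match st with | some (a, _) => if a ≠ 0 then a else s | none => s), s)) r
  | (s, false) :: r => lrFlush st ++ lrEmit none r

theorem lrEmit_zero (e : Int) : ∀ (m : List (Int × Bool)), lrEmit (some (0, e)) m = lrEmit none m := by
  intro m
  match m with
  | [] => simp [lrEmit, lrFlush]
  | (s, true) :: r => simp [lrEmit]
  | (s, false) :: r => simp [lrEmit, lrFlush]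

def lrNorm (start end_ : Option Int) : Option (Int × Int) :=
  if pyTruthy start then some (start.getD 0, end_.getD 0) else none

theorem lrFinal_flush (pairs : List (Int × Int)) (start end_ : Option Int) :
    lrFinal (pairs, start, end_) = pairs ++ lrFlush (lrNorm start end_) := by
  by_cases h : pyTruthy start = true
  · have ha : start.getD 0 ≠ 0 := by
      cases start with
      | none => simp [pyTruthy] at h
      | some s => simpa [pyTruthy] using h
    simp [lrFinal, lrNorm, lrFlush, h, ha]
  · simp [lrFinal, lrNorm, lrFlush, h]

-- A's loop, finalized, equals lrEmit over the marked list
theorem goA_emit (lines : List Int) :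
    ∀ (stmts : List Int) (lidx : Nat) (start end_ : Option Int) (pairs : List (Int × Int)),
    lrFinal (lineRangesGoA lines stmts lidx start end_ pairs)
      = pairs ++ lrEmit (lrNorm start end_) (lineRangesMark lines stmts lidx) := by
  intro stmts
  induction stmts with
  | nil =>
    intro lidx start end_ pairs
    rw [lineRangesGoA, lineRangesMark, lrFinal_flush]
    rfl
  | cons stmt rest ih =>
    intro lidx start end_ pairs
    by_cases hb : lines.length ≤ lidx
    · rw [lineRangesGoA, lineRangesMark, if_pos hb, if_pos hb, lrFinal_flush]
      rfl
    · by_cases hm : stmt = lines.getD lidx 0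
      · -- matched step
        have hm' : (stmt == lines.getD lidx 0) = true := beq_iff_eq.mpr hm
        rw [lineRangesGoA, lineRangesMark, if_neg hb, if_neg hb, if_pos hm, ih, hm']
        simp only [lrEmit]
        by_cases h : pyTruthy start = true
        · have ha : start.getD 0 ≠ 0 := by
            cases start with
            | none => simp [pyTruthy] at h
            | some s => simpa [pyTruthy] using h
          simp [h, lrNorm, ha]
        · simp only [h, if_false, lrNorm, Bool.false_eq_true]
          by_cases hz : stmt = 0
          · subst hz
            simp [pyTruthy, lrEmit_zero]
          · have ht : pyTruthy (some stmt) = true := by simp [pyTruthy, hz]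
            simp [ht]
      · -- unmatched step
        have hm' : (stmt == lines.getD lidx 0) = false := beq_eq_false_iff_ne.mpr hm
        rw [lineRangesGoA, lineRangesMark, if_neg hb, if_neg hb, if_neg hm, hm']
        by_cases h : pyTruthy start = true
        · rw [if_pos h, ih]
          have ha : start.getD 0 ≠ 0 := by
            cases start with
            | none => simp [pyTruthy] at h
            | some s => simpa [pyTruthy] using h
          simp [lrNorm, h, lrEmit, lrFlush, ha, (show pyTruthy none = false from rfl)]
        · rw [if_neg h, ih]
          simp [lrNorm, h, lrEmit, lrFlush]

-- elementwise view of B's coalesce pass; state none = no open range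
def lrFlushB (st : Option (Int × Int)) : List (Int × Int) :=
  match st with
  | none => []
  | some (a, e) => [(a, e)]

def lrEmitB (st : Option (Int × Int)) : List (Int × Bool) → List (Int × Int)
  | [] => lrFlushB st
  | (s, true) :: r =>
      lrEmitB (some ((match st with | some (a, _) => a | none => s), s)) r
  | (s, false) :: r => lrFlushB st ++ lrEmitB none r

def lrNormB (start end_ : Option Int) : Option (Int × Int) :=
  if start.isSome then some (start.getD 0, end_.getD 0) else none

theorem coalesce_emitB :
    ∀ (marked : List (Int × Bool)) (start end_ : Option Int) (pairs : List (Int × Int)),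
    lineRangesCoalesce marked start end_ pairs = pairs ++ lrEmitB (lrNormB start end_) marked := by
  intro marked
  induction marked with
  | nil =>
    intro start end_ pairs
    rw [lineRangesCoalesce]
    by_cases h : start.isSome
    · simp [h, lrNormB, lrEmitB, lrFlushB]
    · simp [h, lrNormB, lrEmitB, lrFlushB]
  | cons p rest ih =>
    obtain ⟨s, m⟩ := p
    intro start end_ pairs
    cases m with
    | true =>
      rw [lineRangesCoalesce, if_pos rfl, ih]
      by_cases h : start.isSome
      · obtain ⟨a, ha⟩ := Option.isSome_iff_exists.mp h
        subst ha
        simp [lrNormB, lrEmitB]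
      · have : start = none := Option.eq_none_iff_forall_ne_some.mpr
          (fun a ha => by simp [ha] at h)
        subst this
        simp [lrNormB, lrEmitB]
    | false =>
      rw [lineRangesCoalesce, if_neg (by simp)]
      by_cases h : start.isSome
      · rw [if_pos h, ih]
        obtain ⟨a, ha⟩ := Option.isSome_iff_exists.mp h
        subst ha
        simp [lrNormB, lrEmitB, lrFlushB]
      · rw [if_neg h, ih]
        have : start = none := Option.eq_none_iff_forall_ne_some.mpr
          (fun a ha => by simp [ha] at h)
        subst this
        simp [lrNormB, lrEmitB, lrFlushB]

-- the event of D_, restated over the marked list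
def evM : List (Int × Bool) → Bool → Bool
  | [], _ => false
  | (s, true) :: r, open_ => (decide (s = 0) && !open_) || evM r (open_ || decide (s ≠ 0))
  | (s, false) :: r, _ => evM r false

-- D_'s scan over the suffix of lines equals evM over the marked list
theorem zeroOpensRun_evM (lines : List Int) :
    ∀ (stmts : List Int) (lidx : Nat) (open_ : Bool),
    zeroOpensRun stmts (lines.drop lidx) open_ = evM (lineRangesMark lines stmts lidx) open_ := by
  intro stmts
  induction stmts with
  | nil =>
    intro lidx open_
    rw [lineRangesMark]
    cases lines.drop lidx <;> rfl
  | cons stmt rest ih =>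
    intro lidx open_
    by_cases hb : lines.length ≤ lidx
    · rw [lineRangesMark, if_pos hb, List.drop_of_length_le hb]
      rfl
    · have hlt : lidx < lines.length := Nat.lt_of_not_le hb
      have hdrop : lines.drop lidx = lines[lidx] :: lines.drop (lidx + 1) :=
        List.drop_eq_getElem_cons hlt
      have hg : lines.getD lidx 0 = lines[lidx] := List.getD_eq_getElem _ _ hlt
      by_cases hm : stmt = lines.getD lidx 0
      · have hm' : (stmt == lines.getD lidx 0) = true := beq_iff_eq.mpr hm
        rw [lineRangesMark, if_neg hb]
        simp only [hm', evM]
        rw [hdrop, zeroOpensRun, if_pos (by rw [← hg]; exact hm), ← ih]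
        simp only [if_pos trivial]
      · have hm' : (stmt == lines.getD lidx 0) = false := beq_eq_false_iff_ne.mpr hm
        rw [lineRangesMark, if_neg hb]
        simp only [hm', evM, Bool.false_eq_true]
        rw [hdrop, zeroOpensRun, if_neg (by rw [← hg]; exact hm), ← hdrop, ← ih]
        simp

-- relation between A's and B's elementwise states when no event has occurred
def lrRel (st st' : Option (Int × Int)) (open_ : Bool) : Prop :=
  (st = none ∧ st' = none ∧ open_ = false) ∨
  (∃ a e, st = some (a, e) ∧ st' = some (a, e) ∧ a ≠ 0 ∧ open_ = true)

-- outside the event, A's and B's elementwise passes produce the same pairs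
theorem emit_eq_of_no_event :
    ∀ (marked : List (Int × Bool)) (st st' : Option (Int × Int)) (open_ : Bool),
    evM marked open_ = false → lrRel st st' open_ → lrEmit st marked = lrEmitB st' marked := by
  intro marked
  induction marked with
  | nil =>
    intro st st' open_ _ hrel
    rcases hrel with ⟨h1, h2, _⟩ | ⟨a, e, h1, h2, ha, _⟩
    · subst h1; subst h2; rfl
    · subst h1; subst h2; simp [lrEmit, lrEmitB, lrFlush, lrFlushB, ha]
  | cons p rest ih =>
    obtain ⟨s, m⟩ := p
    intro st st' open_ hev hrel
    cases m with
    | true =>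
      rw [evM] at hev
      obtain ⟨h1, h2⟩ := Bool.or_eq_false_iff.mp hev
      rcases hrel with ⟨e1, e2, e3⟩ | ⟨a, e, e1, e2, ha, e3⟩
      · subst e1; subst e2; subst e3
        have hs : s ≠ 0 := by
          intro h0; subst h0; simp at h1
        rw [lrEmit, lrEmitB]
        apply ih _ _ _ (by simpa [hs] using h2)
        exact Or.inr ⟨s, s, by simp [hs]⟩
      · subst e1; subst e2; subst e3
        rw [lrEmit, lrEmitB]
        apply ih _ _ _ (by simpa using h2)
        exact Or.inr ⟨a, s, by simp [ha]⟩
    | false =>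
      rw [evM] at hev
      rw [lrEmit, lrEmitB]
      have hfl : lrFlush st = lrFlushB st' := by
        rcases hrel with ⟨e1, e2, _⟩ | ⟨a, e, e1, e2, ha, _⟩
        · subst e1; subst e2; rfl
        · subst e1; subst e2; simp [lrFlush, lrFlushB, ha]
      rw [hfl, ih _ _ _ hev (Or.inl ⟨rfl, rfl, rfl⟩)]

-- every pair A's pass emits has a nonzero start
theorem emit_fst_ne_zero :
    ∀ (marked : List (Int × Bool)) (st : Option (Int × Int)) (p : Int × Int),
    p ∈ lrEmit st marked → p.1 ≠ 0 := by
  intro marked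
  induction marked with
  | nil =>
    intro st p hp
    match st with
    | none => simp [lrEmit, lrFlush] at hp
    | some (a, e) =>
      by_cases ha : a = 0
      · simp [lrEmit, lrFlush, ha] at hp
      · simp [lrEmit, lrFlush, ha] at hp
        simp [hp, ha]
  | cons q rest ih =>
    obtain ⟨s, m⟩ := q
    intro st p hp
    cases m with
    | true => exact ih _ _ hp
    | false =>
      rw [lrEmit] at hp
      rcases List.mem_append.mp hp with h | h
      · match st with
        | none => simp [lrFlush] at h
        | some (a, e) =>
          by_cases ha : a = 0
          · simp [lrFlush, ha] at h
          · simp [lrFlush, ha] at h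
            simp [h, ha]
      · exact ih _ _ h

-- the start of B's open range is eventually emitted
theorem emitB_start_mem :
    ∀ (marked : List (Int × Bool)) (a e : Int),
    ∃ e', (a, e') ∈ lrEmitB (some (a, e)) marked := by
  intro marked
  induction marked with
  | nil => intro a e; exact ⟨e, by simp [lrEmitB, lrFlushB]⟩
  | cons q rest ih =>
    obtain ⟨s, m⟩ := q
    intro a e
    cases m with
    | true =>
      obtain ⟨e', h⟩ := ih a s
      exact ⟨e', by rwa [lrEmitB]⟩
    | false =>
      exact ⟨e, by rw [lrEmitB]; exact List.mem_append.mpr (Or.inl (by simp [lrFlushB]))⟩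

-- inside the event, B's pass emits a pair starting at 0
theorem emitB_zero_of_event :
    ∀ (marked : List (Int × Bool)) (st' : Option (Int × Int)),
    evM marked st'.isSome = true → ∃ e, (0, e) ∈ lrEmitB st' marked := by
  intro marked
  induction marked with
  | nil => intro st' hev; rw [evM] at hev; exact absurd hev (by simp)
  | cons q rest ih =>
    obtain ⟨s, m⟩ := q
    intro st' hev
    cases m with
    | true =>
      rw [evM] at hev
      rcases Bool.or_eq_true_iff.mp hev with h | h
      · -- the event fires here: st' is none and s = 0
        have hs : s = 0 := by
          cases hd : decide (s = 0)
          · simp [hd] at h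
          · exact of_decide_eq_true hd
        have hn : st' = none := by
          cases st' with
          | none => rfl
          | some v => simp at h
        subst hn; subst hs
        obtain ⟨e', h'⟩ := emitB_start_mem rest 0 0
        exact ⟨e', by rwa [lrEmitB]⟩
      · -- the event fires later, with an open range
        match st' with
        | none =>
          by_cases hs : s = 0
          · subst hs
            obtain ⟨e', h'⟩ := emitB_start_mem rest 0 0
            exact ⟨e', by rwa [lrEmitB]⟩
          · obtain ⟨e, hm⟩ := ih (some (s, s)) (by simpa [hs] using h)
            exact ⟨e, by rwa [lrEmitB]⟩
        | some (a, e0) =>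
          obtain ⟨e, hm⟩ := ih (some (a, s)) (by simpa using h)
          exact ⟨e, by rwa [lrEmitB]⟩
    | false =>
      rw [evM] at hev
      obtain ⟨e, hm⟩ := ih none (by simpa using hev)
      exact ⟨e, by rw [lrEmitB]; exact List.mem_append.mpr (Or.inr hm)⟩

-- both top-level programs, reduced to the elementwise passes over the marked list
theorem lineRanges_eq_emit (statements lines : List Int) :
    line_ranges_py statements lines
      = lrEmit none (lineRangesMark (PySem.List.sorted lines (fun x => x) false)
          (PySem.List.sorted statements (fun x => x) false) 0) := by
  have h := goA_emit (PySem.List.sorted lines (fun x => x) false)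
      (PySem.List.sorted statements (fun x => x) false) 0 none none []
  unfold line_ranges_py
  rw [show lrNorm none none = none from rfl] at h
  rw [List.nil_append] at h
  rw [← h]
  rcases hg : lineRangesGoA (PySem.List.sorted lines (fun x => x) false)
      (PySem.List.sorted statements (fun x => x) false) 0 none none [] with ⟨p, s, e⟩
  simp only [hg, lrFinal]

theorem lineRangesAlt_eq_emitB (statements lines : List Int) :
    line_ranges_py_alt statements lines
      = lrEmitB none (lineRangesMark (PySem.List.sorted lines (fun x => x) false)
          (PySem.List.sorted statements (fun x => x) false) 0) := by
  unfold line_ranges_py_alt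
  rw [coalesce_emitB]
  rfl

-- D_'s mergeSort is the same ordering as the ports' Python sort
theorem sorted_eq_mergeSort (xs : List Int) :
    PySem.List.sorted xs (fun x => x) false = xs.mergeSort (· ≤ ·) := by
  refine PySem.List.sorted_id_eq_of_perm_of_pairwise _ _ (List.mergeSort_perm xs _) ?_
  have := List.pairwise_mergeSort (le := fun a b : Int => decide (a ≤ b))
    (fun a b c => by simpa using le_trans) (fun a b => by simpa using le_total a b) xs
  simpa using this

-- D_ restated over the marked list of the two sorted inputs
theorem D_iff_evM (statements lines : List Int) :
    D_line_ranges_py statements lines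
      ↔ evM (lineRangesMark (PySem.List.sorted lines (fun x => x) false)
          (PySem.List.sorted statements (fun x => x) false) 0) false = true := by
  unfold D_line_ranges_py
  rw [← zeroOpensRun_evM, ← sorted_eq_mergeSort, ← sorted_eq_mergeSort]
  rfl

-- ===== VERDICT (by name: the statements are the Claim_ definitions above) =====
theorem line_ranges_py_spec : Claim_unchanged_line_ranges_py := by
  intro statements lines _
  unfold Spec_line_ranges_py
  intro hnd
  rw [D_iff_evM] at hnd
  rw [lineRanges_eq_emit, lineRangesAlt_eq_emitB]
  exact emit_eq_of_no_event _ none none false (Bool.not_eq_true _ ▸ (by simpa using hnd))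
    (Or.inl ⟨rfl, rfl, rfl⟩)

theorem line_ranges_py_changed : Claim_changed_line_ranges_py := by
  unfold Claim_changed_line_ranges_py
  exact ⟨by decide, (D_iff_evM _ _).mpr (by decide), by decide, by decide, by decide⟩

theorem line_ranges_py_tight : Claim_exact_line_ranges_py := by
  intro statements lines _ hd heq
  rw [D_iff_evM] at hd
  rw [lineRanges_eq_emit, lineRangesAlt_eq_emitB] at heq
  obtain ⟨e, hmem⟩ := emitB_zero_of_event _ none (by simpa using hd)
  exact emit_fst_ne_zero _ none (0, e) (heq ▸ hmem) rfl
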